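-- pv_equiv track=rewrite | github.com/shrxya1810/ZerotoOne-Adobe-Final-Submission | Connect-the-Dots-clean-main/Connect-the-Dots-clean-main/server/pdf_extractor.py | _flows_naturally_from_previous
-- ===== SOURCE A (Python) =====
-- def _flows_naturally_from_previous(current_text: str, prev_text: str) -> bool:
--     """Check if current text flows naturally from previous text"""
--
--     # Common continuation indicators
--     flow_starters = ['and', 'but', 'or', 'so', 'yet', 'for', 'nor', 'as', 'if', 'when', 'while', 'because']
--
--     current_lower = current_text.lower().strip()
--     for starter in flow_starters:
--         if current_lower.startswith(starter + ' '):
--             return True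
--
--     # Check for relative clauses or dependent clauses
--     if current_lower.startswith(('that ', 'which ', 'who ', 'where ', 'when ', 'why ', 'how ')):
--         return True
--
--     return False
-- ===== SOURCE B (Python) =====
-- def _flows_naturally_from_previous(current_text: str, prev_text: str) -> bool:
--     """Check if current text flows naturally from previous text"""
--
--     # One set of starter words (conjunctions + relative/dependent-clause openers);
--     # the word counts only when followed by a literal space.
--     starters = {'and', 'but', 'or', 'so', 'yet', 'for', 'nor', 'as', 'if',
--                 'when', 'while', 'because', 'that', 'which', 'who', 'where',
--                 'why', 'how'}
--
--     head, sep, _rest = current_text.lower().strip().partition(' ')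
--     return bool(sep) and head in starters
-- ===== Notes on version B (the rewrite author's own statement) =====
-- stated objective: idiomatic
-- what changed: Instead of scanning 12 startswith prefixes plus a 7-way startswith tuple, B extracts the first space-delimited token once with str.partition(' ') and tests it for membership in a single set of starter words.
import Mathlib
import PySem

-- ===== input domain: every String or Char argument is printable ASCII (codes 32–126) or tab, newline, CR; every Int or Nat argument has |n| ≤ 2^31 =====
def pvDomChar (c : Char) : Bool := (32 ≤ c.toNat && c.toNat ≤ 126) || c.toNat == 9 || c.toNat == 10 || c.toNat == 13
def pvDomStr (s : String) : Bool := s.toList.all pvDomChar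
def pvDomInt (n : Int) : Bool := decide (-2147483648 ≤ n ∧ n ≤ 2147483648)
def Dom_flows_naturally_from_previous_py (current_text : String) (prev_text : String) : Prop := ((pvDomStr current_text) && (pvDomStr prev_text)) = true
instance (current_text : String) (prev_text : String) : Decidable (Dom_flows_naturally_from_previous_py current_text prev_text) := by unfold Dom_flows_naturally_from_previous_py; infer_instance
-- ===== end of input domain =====

-- B replaces A's per-prefix startswith scan (12 conjunctions + a 7-way startswith tuple)
-- by extracting the first space-delimited token once (str.partition(' ')) and testing
-- membership in a single set of starter words; objective: idiomatic, same cost.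


-- ===== PORT A =====
-- flow_starters, in source order
def pvFlowStarters : List (List Char) :=
  ["and".toList, "but".toList, "or".toList, "so".toList, "yet".toList, "for".toList,
   "nor".toList, "as".toList, "if".toList, "when".toList, "while".toList, "because".toList]

-- the tuple of relative/dependent-clause prefixes (spaces included, as in the source)
def pvRelPrefixes : List (List Char) :=
  ["that ".toList, "which ".toList, "who ".toList, "where ".toList, "when ".toList,
   "why ".toList, "how ".toList]

def flows_naturally_from_previous_py (current_text : String) (prev_text : String) : Bool :=
  let currentLower := PySem.Chars.strip (PySem.Chars.lower current_text.toList)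
  -- for starter in flow_starters: if current_lower.startswith(starter + ' '): return True
  if pvFlowStarters.any (fun starter => PySem.Chars.startswith currentLower (starter ++ [' '])) then
    true
  -- if current_lower.startswith(('that ', …)): return True
  else if pvRelPrefixes.any (fun p => PySem.Chars.startswith currentLower p) then
    true
  else
    false

-- ===== PORT B =====
-- the set literal of Source B (18 literals; all distinct)
def pvStarterSet : List (List Char) :=
  ["and".toList, "but".toList, "or".toList, "so".toList, "yet".toList, "for".toList,
   "nor".toList, "as".toList, "if".toList, "when".toList, "while".toList, "because".toList,
   "that".toList, "which".toList, "who".toList, "where".toList, "why".toList, "how".toList]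

-- str.partition(' '): (text before first space, whether a space was found); the rest is unused by B
def pvPartitionSpace : List Char → (List Char × Bool)
  | [] => ([], false)
  | c :: cs => if c = ' ' then ([], true) else
      let r := pvPartitionSpace cs
      (c :: r.1, r.2)

def flows_naturally_from_previous_py_alt (current_text : String) (prev_text : String) : Bool :=
  let r := pvPartitionSpace (PySem.Chars.strip (PySem.Chars.lower current_text.toList))
  r.2 && pvStarterSet.contains r.1

-- ===== PRECONDITION & SPEC =====
def Spec_flows_naturally_from_previous_py (current_text : String) (prev_text : String) (out : Bool) : Prop := out = flows_naturally_from_previous_py_alt current_text prev_text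
instance (current_text : String) (prev_text : String) (out : Bool) : Decidable (Spec_flows_naturally_from_previous_py current_text prev_text out) := by unfold Spec_flows_naturally_from_previous_py; infer_instance

-- ===== CLAIM (what is proved, stated in full; the proofs are below) =====
def Claim_equal_flows_naturally_from_previous_py : Prop := ∀ (current_text : String) (prev_text : String), Dom_flows_naturally_from_previous_py current_text prev_text → Spec_flows_naturally_from_previous_py current_text prev_text (flows_naturally_from_previous_py current_text prev_text)

-- ===== LEMMAS AND PROOFS =====

-- a word w with no space: "w + ' '" is a prefix of t iff partition finds a space and the head is w
theorem pvStartswith_word_space_iff (t : List Char) (w : List Char) (hw : ' ' ∉ w) :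
    (w ++ [' ']) <+: t ↔ ((pvPartitionSpace t).2 = true ∧ (pvPartitionSpace t).1 = w) := by
  induction t generalizing w with
  | nil =>
      rw [List.prefix_nil]
      simp only [pvPartitionSpace, List.append_eq_nil_iff]
      simp
  | cons c cs ih =>
      cases w with
      | nil =>
          by_cases hc : c = ' '
          · subst hc; simp [pvPartitionSpace, List.cons_prefix_cons]
          · simp [pvPartitionSpace, hc, List.cons_prefix_cons, Ne.symm hc]
      | cons a w' =>
          have ha : a ≠ ' ' := fun h => hw (h ▸ List.mem_cons_self ..)
          have hw' : ' ' ∉ w' := fun h => hw (List.mem_cons_of_mem _ h)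
          by_cases hc : c = ' '
          · subst hc
            simp [pvPartitionSpace, List.cons_prefix_cons]
            exact fun h => absurd h ha
          · simp only [List.cons_append, List.cons_prefix_cons, pvPartitionSpace, hc, if_false,
              List.cons.injEq, ih w' hw']
            tauto

-- Bool form, ready for rewriting inside the ports
theorem pvSW (t : List Char) (w : List Char) (hw : ' ' ∉ w) :
    PySem.Chars.startswith t (w ++ [' ']) =
      ((pvPartitionSpace t).2 && ((pvPartitionSpace t).1 == w)) := by
  have h := pvStartswith_word_space_iff t w hw
  rw [Bool.eq_iff_iff, PySem.Chars.startswith_iff]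
  simp [h]

-- lift pvSW over a whole list of space-free words
theorem pvAnyStart (ws : List (List Char)) (t : List Char) (h : ∀ w ∈ ws, ' ' ∉ w) :
    (ws.any fun w => PySem.Chars.startswith t (w ++ [' '])) =
      ((pvPartitionSpace t).2 && ws.contains (pvPartitionSpace t).1) := by
  induction ws with
  | nil => simp
  | cons w ws ih =>
      rw [List.any_cons, List.contains_cons, pvSW t w (h w (List.mem_cons_self ..)),
        ih (fun x hx => h x (List.mem_cons_of_mem _ hx))]
      exact (Bool.and_or_distrib_left ..).symm

-- the relative-clause words, spaces stripped (proof-side helper)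
def pvRelWords : List (List Char) :=
  ["that".toList, "which".toList, "who".toList, "where".toList, "when".toList,
   "why".toList, "how".toList]

-- flow starters and relative words together are exactly B's starter set
theorem pvUnion (x : List Char) :
    (pvFlowStarters.contains x || pvRelWords.contains x) = pvStarterSet.contains x := by
  by_cases hx : x = "when".toList
  · subst hx; decide
  · have hw : (x == "when".toList) = false := by simpa using hx
    simp only [pvFlowStarters, pvRelWords, pvStarterSet, List.contains_cons,
      List.elem_nil, hw, Bool.or_false, Bool.false_or, Bool.or_assoc]

-- ===== VERDICT (by name: the statement is the Claim_ definition above) =====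
theorem flows_naturally_from_previous_py_spec : Claim_equal_flows_naturally_from_previous_py := by
  intro current_text prev_text _
  unfold Spec_flows_naturally_from_previous_py
  simp only [flows_naturally_from_previous_py, flows_naturally_from_previous_py_alt]
  generalize PySem.Chars.strip (PySem.Chars.lower current_text.toList) = t
  have hflow := pvAnyStart pvFlowStarters t (by decide)
  have hrelw : (pvRelPrefixes.any fun p => PySem.Chars.startswith t p) =
      (pvRelWords.any fun w => PySem.Chars.startswith t (w ++ [' '])) := by
    simp only [pvRelPrefixes, pvRelWords, List.any_cons, List.any_nil]
    rw [show ("that " : String).toList = "that".toList ++ [' '] by decide,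
        show ("which " : String).toList = "which".toList ++ [' '] by decide,
        show ("who " : String).toList = "who".toList ++ [' '] by decide,
        show ("where " : String).toList = "where".toList ++ [' '] by decide,
        show ("when " : String).toList = "when".toList ++ [' '] by decide,
        show ("why " : String).toList = "why".toList ++ [' '] by decide,
        show ("how " : String).toList = "how".toList ++ [' '] by decide]
  have hrel := hrelw.trans (pvAnyStart pvRelWords t (by decide))
  rw [← pvUnion (pvPartitionSpace t).1]
  simp only [hflow, hrel]
  cases hF : pvFlowStarters.contains (pvPartitionSpace t).1 <;>
    cases hR : pvRelWords.contains (pvPartitionSpace t).1 <;>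
      cases h2 : (pvPartitionSpace t).2 <;> simp
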